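-- pv_equiv track=rewrite | github.com/ZiyuanMa/TownBench | engine/rules.py | project_inventory
-- ===== SOURCE A (Python) =====
-- from collections.abc import Mapping
--
-- def project_inventory(inventory: Mapping[str, int], inventory_delta: Mapping[str, int]) -> dict[str, int] | None:
--     projected = dict(inventory)
--     for item_id, delta in inventory_delta.items():
--         new_quantity = projected.get(item_id, 0) + delta
--         if new_quantity < 0:
--             return None
--         if new_quantity == 0:
--             projected.pop(item_id, None)
--             continue
--         projected[item_id] = new_quantity
--     return projected
-- ===== SOURCE B (Python) =====
-- def project_inventory(inventory, inventory_delta):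
--     # B: two sequential passes — first validate every delta against the ORIGINAL
--     # inventory and record the resulting quantities, then apply them to a copy.
--     updates = []
--     for item_id, delta in inventory_delta.items():
--         new_quantity = inventory.get(item_id, 0) + delta
--         if new_quantity < 0:
--             return None
--         updates.append((item_id, new_quantity))
--     projected = dict(inventory)
--     for item_id, new_quantity in updates:
--         if new_quantity == 0:
--             projected.pop(item_id, None)
--         else:
--             projected[item_id] = new_quantity
--     return projected
-- ===== Notes on version B (the rewrite author's own statement) =====
-- stated objective: alternative
-- what changed: B splits A's single interleaved mutate-and-check pass into two phases: a validation pass that reads only the original inventory and collects (key, new quantity) updates (with early None on a negative), followed by an application pass over a fresh copy; correctness rests on delta keys being distinct, so reads never see earlier writes.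
import Mathlib
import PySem

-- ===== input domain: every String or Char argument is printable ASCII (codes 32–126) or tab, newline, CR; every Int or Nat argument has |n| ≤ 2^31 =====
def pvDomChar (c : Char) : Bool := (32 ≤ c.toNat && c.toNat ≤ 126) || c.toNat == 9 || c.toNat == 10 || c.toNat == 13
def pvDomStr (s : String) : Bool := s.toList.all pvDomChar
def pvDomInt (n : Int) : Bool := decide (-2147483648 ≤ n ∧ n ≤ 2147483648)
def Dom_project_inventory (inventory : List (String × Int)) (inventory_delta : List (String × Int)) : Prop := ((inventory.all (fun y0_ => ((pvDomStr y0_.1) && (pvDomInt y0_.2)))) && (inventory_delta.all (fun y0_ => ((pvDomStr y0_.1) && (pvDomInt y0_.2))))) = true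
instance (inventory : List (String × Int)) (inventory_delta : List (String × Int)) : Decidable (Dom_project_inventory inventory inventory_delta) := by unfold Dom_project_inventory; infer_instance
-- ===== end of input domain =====

-- B replaces A's single interleaved mutate-and-check pass by a validation pass over the
-- original inventory followed by an application pass over a fresh copy (objective: alternative).


-- ===== PORT A =====
-- A's loop over inventory_delta.items(), mutating `projected` in place with early return None.
def pvALoop : List (String × Int) → PySem.Dict String Int → Option (PySem.Dict String Int)
  | [], projected => some projected
  | (item_id, delta) :: rest, projected =>
    let new_quantity := projected.getD item_id 0 + delta
    if new_quantity < 0 then none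
    else if new_quantity = 0 then pvALoop rest (projected.erase item_id)
    else pvALoop rest (projected.insert item_id new_quantity)

def project_inventory (inventory : List (String × Int)) (inventory_delta : List (String × Int)) : Option (List (String × Int)) :=
  (pvALoop (PySem.Dict.ofList inventory_delta).items (PySem.Dict.ofList inventory)).map (fun d => d.items)

-- ===== PORT B =====
-- B's first pass: validate each delta against the ORIGINAL inventory, collecting updates.
def pvValidate (inv : PySem.Dict String Int) : List (String × Int) → Option (List (String × Int))
  | [] => some []
  | (item_id, delta) :: rest =>
    let new_quantity := inv.getD item_id 0 + delta
    if new_quantity < 0 then none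
    else (pvValidate inv rest).map (fun us => (item_id, new_quantity) :: us)

-- B's second pass: apply the recorded updates to a copy of the inventory.
def pvApply (projected : PySem.Dict String Int) (updates : List (String × Int)) : PySem.Dict String Int :=
  updates.foldl (fun projected p => if p.2 = 0 then projected.erase p.1 else projected.insert p.1 p.2) projected

def project_inventory_alt (inventory : List (String × Int)) (inventory_delta : List (String × Int)) : Option (List (String × Int)) :=
  match pvValidate (PySem.Dict.ofList inventory) (PySem.Dict.ofList inventory_delta).items with
  | none => none
  | some updates => some (pvApply (PySem.Dict.ofList inventory) updates).items

-- ===== PRECONDITION & SPEC =====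
def Spec_project_inventory (inventory : List (String × Int)) (inventory_delta : List (String × Int)) (out : Option (List (String × Int))) : Prop := out = project_inventory_alt inventory inventory_delta
instance (inventory : List (String × Int)) (inventory_delta : List (String × Int)) (out : Option (List (String × Int))) : Decidable (Spec_project_inventory inventory inventory_delta out) := by unfold Spec_project_inventory; infer_instance

-- ===== CLAIM (what is proved, stated in full; the proofs are below) =====
def Claim_equal_project_inventory : Prop := ∀ (inventory : List (String × Int)) (inventory_delta : List (String × Int)), Dom_project_inventory inventory inventory_delta → Spec_project_inventory inventory inventory_delta (project_inventory inventory inventory_delta)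

-- ===== LEMMAS AND PROOFS =====
theorem pv_find?_filter_ne (k k' : String) (h : k' ≠ k) :
    ∀ (l : List (String × Int)),
      List.find? (fun p => p.1 == k') (l.filter (fun p => !p.1 == k)) =
        List.find? (fun p => p.1 == k') l := by
  intro l
  induction l with
  | nil => rfl
  | cons p rest ih =>
    by_cases hk : p.1 = k
    · have hp : ¬ p.1 = k' := fun hp => h (by rw [← hp, ← hk])
      simp [hk, ih, Ne.symm h]
    · by_cases hp : p.1 = k'
      · simp [hp, h]
      · simp [hk, hp, ih]

theorem pv_getD_erase_of_ne (d : PySem.Dict String Int) (k k' : String) (h : k' ≠ k) :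
    (d.erase k).getD k' 0 = d.getD k' 0 := by
  obtain ⟨l⟩ := d
  simp only [PySem.Dict.getD, PySem.Dict.get?, PySem.Dict.erase]
  rw [pv_find?_filter_ne k k' h l]

theorem pv_loop_eq (inv : PySem.Dict String Int) :
    ∀ (ds : List (String × Int)) (proj : PySem.Dict String Int),
      (ds.map (·.1)).Nodup →
      (∀ p ∈ ds, proj.getD p.1 0 = inv.getD p.1 0) →
      pvALoop ds proj = (pvValidate inv ds).map (fun us => pvApply proj us) := by
  intro ds
  induction ds with
  | nil => intro proj _ _; rfl
  | cons p rest ih =>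
    intro proj hnd hinv
    obtain ⟨k, d⟩ := p
    have hk : proj.getD k 0 = inv.getD k 0 := hinv (k, d) (by simp)
    rw [List.map_cons] at hnd
    obtain ⟨hknotin, hndrest⟩ := List.nodup_cons.mp hnd
    simp only [pvALoop, pvValidate, hk]
    by_cases hneg : inv.getD k 0 + d < 0
    · simp [hneg]
    · simp only [hneg, if_false]
      by_cases hz : inv.getD k 0 + d = 0
      · rw [ih (proj.erase k) hndrest ?_]
        · cases hrest : pvValidate inv rest with
          | none => simp [hz]
          | some us => simp [hz, pvApply]
        · intro q hq
          rw [pv_getD_erase_of_ne]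
          · exact hinv q (by simp [hq])
          · intro he
            exact hknotin (by rw [← he]; exact List.mem_map_of_mem (f := fun x => x.1) hq)
      · rw [ih (proj.insert k (inv.getD k 0 + d)) hndrest ?_]
        · cases hrest : pvValidate inv rest with
          | none => simp [hz]
          | some us => simp [hz, pvApply]
        · intro q hq
          rw [PySem.Dict.getD_insert]
          rw [if_neg (fun he => hknotin (by rw [← he]; exact List.mem_map_of_mem (f := fun x => x.1) hq))]
          exact hinv q (by simp [hq])

-- ===== VERDICT (by name: the statement is the Claim_ definition above) =====
theorem project_inventory_spec : Claim_equal_project_inventory := by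
  intro inventory inventory_delta _
  unfold Spec_project_inventory project_inventory project_inventory_alt
  rw [pv_loop_eq (PySem.Dict.ofList inventory) _ _ ?_ (fun _ _ => rfl)]
  · cases pvValidate (PySem.Dict.ofList inventory) (PySem.Dict.ofList inventory_delta).items with
    | none => rfl
    | some us => rfl
  · simpa [PySem.Dict.keys] using PySem.Dict.nodup_keys_ofList (κ := String) (ν := Int) inventory_delta
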